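-- pv_equiv track=rewrite | github.com/62hoon99/daily-programmers | Python3/프로그래머스/2/42626. 더 맵게/더 맵게.py | solution
-- ===== SOURCE A (Python) =====
-- import heapq
--
-- def solution(scoville, K):
--     answer = 0
--     food = []
--
--     for s in scoville:
--         heapq.heappush(food, s)
--
--     while food[0] < K:
--         if len(food) < 2:
--             return -1
--         f1 = heapq.heappop(food)
--         f2 = heapq.heappop(food)
--         heapq.heappush(food, f1 + (f2 * 2))
--         answer += 1
--
--     return answer
-- ===== SOURCE B (Python) =====
-- def solution(scoville, K):
--     # Two-queue (Huffman-style) merge instead of a heap: mixes are consumed in the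
--     # order they are produced, so a FIFO of mixed values merged with the sorted
--     # input yields the two smallest in O(1) per step, with no reinsertion at all.
--     q1 = sorted(scoville)
--     q2 = []              # FIFO of mixed values; its live part q2[j:] is nondecreasing
--     i = j = 0
--     answer = 0
--     while True:
--         if i < len(q1) and (j >= len(q2) or q1[i] <= q2[j]):
--             small = q1[i]
--         else:
--             small = q2[j]          # IndexError only when both queues are empty
--         if small >= K:
--             return answer
--         if (len(q1) - i) + (len(q2) - j) < 2:
--             return -1
--         if i < len(q1) and (j >= len(q2) or q1[i] <= q2[j]):
--             f1 = q1[i]; i += 1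
--         else:
--             f1 = q2[j]; j += 1
--         if i < len(q1) and (j >= len(q2) or q1[i] <= q2[j]):
--             f2 = q1[i]; i += 1
--         else:
--             f2 = q2[j]; j += 1
--         q2.append(f1 + f2 * 2)
--         answer += 1
-- ===== Notes on version B (the rewrite author's own statement) =====
-- stated objective: faster
-- what changed: Replaces the heap by the two-queue Huffman-merge technique: sort the input once, keep mixed values in a plain FIFO (they are produced in nondecreasing order), and take each minimum by comparing the two queue fronts, so every mixing step is O(1) pointer moves instead of O(log n) heap sifts.
import Mathlib
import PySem

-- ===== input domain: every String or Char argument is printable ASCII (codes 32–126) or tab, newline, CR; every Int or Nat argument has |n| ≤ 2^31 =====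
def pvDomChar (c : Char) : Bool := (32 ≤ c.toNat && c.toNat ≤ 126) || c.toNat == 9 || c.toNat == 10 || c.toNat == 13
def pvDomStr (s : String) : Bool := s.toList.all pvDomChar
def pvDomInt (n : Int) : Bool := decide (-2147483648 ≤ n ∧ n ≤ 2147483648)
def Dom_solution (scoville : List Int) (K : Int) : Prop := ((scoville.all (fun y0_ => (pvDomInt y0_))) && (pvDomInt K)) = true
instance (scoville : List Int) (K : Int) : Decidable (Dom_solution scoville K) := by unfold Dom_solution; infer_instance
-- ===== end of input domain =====

-- B replaces A's binary heap by the two-queue Huffman-merge technique: sort once,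
-- keep mixed values in a FIFO (they come out in nondecreasing order), and read each
-- minimum off the two queue fronts; same return value wherever A returns.

-- ===== PORT A =====
-- heapq is modelled semantically over the list `food`: the heap root `food[0]` is the
-- minimum of the heap, `heappop` removes one minimal element, `heappush` adds its
-- argument; this is exact on the function's observable output (only the minima and the
-- multiset of the heap ever influence it).
def heapPush (food : List Int) (s : Int) : List Int := food ++ [s]

def solutionGo (food : List Int) (K answer : Int) : Int :=
  match h : PySem.List.min? food (fun x => x) with
  | none => answer   -- empty heap: Python raises IndexError at food[0] (excluded by Pre_solution)
  | some f1 =>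
    if f1 < K then
      if food.length < 2 then -1
      else
        -- f1 = heappop(food) leaves food.erase f1; f2 = heappop(food) its minimum
        match h2 : PySem.List.min? (food.erase f1) (fun x => x) with
        | none => -1   -- unreachable: here food has at least two elements
        | some f2 =>
          solutionGo (heapPush ((food.erase f1).erase f2) (f1 + f2 * 2)) K (answer + 1)
    else answer
termination_by food.length
decreasing_by
  have hf1 : f1 ∈ food := PySem.List.min?_mem h
  have hf2 : f2 ∈ food.erase f1 := PySem.List.min?_mem h2
  have e1 : (food.erase f1).length = food.length - 1 := List.length_erase_of_mem hf1
  have e2 : ((food.erase f1).erase f2).length = (food.erase f1).length - 1 :=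
    List.length_erase_of_mem hf2
  have p2 : 0 < (food.erase f1).length := List.length_pos_of_mem hf2
  simp only [heapPush, List.length_append, List.length_cons, List.length_nil, e2, e1]
  omega

def solution (scoville : List Int) (K : Int) : Int :=
  solutionGo (scoville.foldl heapPush []) K 0

-- ===== PORT B =====
-- the `pop` of Source B: take the smaller front of q1[i:] / q2[j:], preferring q1 on ties
-- (q1[i]? / q2[j]? are the fronts; none, none = IndexError, excluded by Pre_solution)
def popQ (q1 q2 : List Int) (i j : Nat) : Option (Int × Nat × Nat) :=
  match q1[i]?, q2[j]? with
  | some a, some b => if a ≤ b then some (a, i + 1, j) else some (b, i, j + 1)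
  | some a, none   => some (a, i + 1, j)
  | none,   some b => some (b, i, j + 1)
  | none,   none   => none

lemma popQ_shape (q1 q2 : List Int) (i j : Nat) (v : Int) (i' j' : Nat)
    (h : popQ q1 q2 i j = some (v, i', j')) :
    (i < q1.length ∧ i' = i + 1 ∧ j' = j) ∨ (j < q2.length ∧ i' = i ∧ j' = j + 1) := by
  unfold popQ at h
  cases h1 : q1[i]? with
  | none =>
    cases h2 : q2[j]? with
    | none => rw [h1, h2] at h; exact absurd h (by simp)
    | some b =>
      rw [h1, h2] at h
      simp only [Option.some.injEq, Prod.mk.injEq] at h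
      obtain ⟨rfl, rfl, rfl⟩ := h
      obtain ⟨hlt, -⟩ := List.getElem?_eq_some_iff.mp h2
      exact Or.inr ⟨hlt, rfl, rfl⟩
  | some a =>
    obtain ⟨hia, -⟩ := List.getElem?_eq_some_iff.mp h1
    cases h2 : q2[j]? with
    | none =>
      rw [h1, h2] at h
      simp only [Option.some.injEq, Prod.mk.injEq] at h
      obtain ⟨rfl, rfl, rfl⟩ := h
      exact Or.inl ⟨hia, rfl, rfl⟩
    | some b =>
      obtain ⟨hjb, -⟩ := List.getElem?_eq_some_iff.mp h2
      rw [h1, h2] at h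
      dsimp only at h
      split_ifs at h with hab <;>
        (simp only [Option.some.injEq, Prod.mk.injEq] at h; obtain ⟨rfl, rfl, rfl⟩ := h)
      · exact Or.inl ⟨hia, rfl, rfl⟩
      · exact Or.inr ⟨hjb, rfl, rfl⟩

-- the while loop of Source B over the two queues; `small` is the value the first pop
-- would take, so it is computed together with that pop (the state is only advanced
-- inside the mixing branch, exactly as in Source B)
def altGo (q1 q2 : List Int) (i j : Nat) (K ans : Int) : Int :=
  match h1 : popQ q1 q2 i j with
  | none => ans   -- both queues empty: Python raises IndexError (excluded by Pre_solution)
  | some (f1, i1, j1) =>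
    if f1 < K then
      if ((q1.length : Int) - i) + ((q2.length : Int) - j) < 2 then -1
      else
        match h2 : popQ q1 q2 i1 j1 with
        | none => -1   -- unreachable: at least two live elements
        | some (f2, i2, j2) =>
          altGo q1 (q2 ++ [f1 + f2 * 2]) i2 j2 K (ans + 1)
    else ans
termination_by (q1.length - i) + (q2.length - j)
decreasing_by
  rcases popQ_shape _ _ _ _ _ _ _ h1 with ⟨ha, rfl, rfl⟩ | ⟨ha, rfl, rfl⟩ <;>
    rcases popQ_shape _ _ _ _ _ _ _ h2 with ⟨hb, rfl, rfl⟩ | ⟨hb, rfl, rfl⟩ <;>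
    (simp only [List.length_append, List.length_cons, List.length_nil]; omega)

def solution_alt (scoville : List Int) (K : Int) : Int :=
  altGo (PySem.List.sorted scoville (fun x => x) false) [] 0 0 K 0

-- ===== PRECONDITION & SPEC =====
-- Pre_ excludes only the empty list, where the Python A raises IndexError at food[0].
def Pre_solution (scoville : List Int) (K : Int) : Prop := scoville ≠ []
instance (scoville : List Int) (K : Int) : Decidable (Pre_solution scoville K) := by
  unfold Pre_solution; infer_instance

def pvWitness_solution : List Int × Int := ([1, 2, 3, 9, 10, 12], 7)

def Spec_solution (scoville : List Int) (K : Int) (out : Int) : Prop := out = solution_alt scoville K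
instance (scoville : List Int) (K : Int) (out : Int) : Decidable (Spec_solution scoville K out) := by unfold Spec_solution; infer_instance

-- ===== CLAIM (what is proved, stated in full; the proofs are below) =====
def Claim_equal_solution : Prop := ∀ (scoville : List Int) (K : Int), Dom_solution scoville K → Pre_solution scoville K → Spec_solution scoville K (solution scoville K)

-- ===== LEMMAS AND PROOFS =====

-- proof-side reference loop: the greedy process on one sorted list, with ordered
-- insertion written structurally; both ports are reduced to it
def insLin (food : List Int) (new : Int) : List Int :=
  match food with
  | [] => [new]
  | x :: xs => if x < new then x :: insLin xs new else new :: x :: xs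

lemma insLin_length (l : List Int) (v : Int) : (insLin l v).length = l.length + 1 := by
  induction l with
  | nil => simp [insLin]
  | cons x xs ih => simp only [insLin]; split <;> simp [ih]

def sortedGo (food : List Int) (K answer : Int) : Int :=
  match food with
  | [] => answer
  | f1 :: rest =>
    if f1 < K then
      match rest with
      | [] => -1
      | f2 :: rest' => sortedGo (insLin rest' (f1 + f2 * 2)) K (answer + 1)
    else answer
termination_by food.length
decreasing_by simp [insLin_length]

lemma insLin_perm (l : List Int) (v : Int) : (insLin l v).Perm (v :: l) := by
  induction l with
  | nil => simp [insLin]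
  | cons x xs ih =>
    simp only [insLin]
    split
    · exact ((ih.cons x).trans (List.Perm.swap v x xs))
    · exact List.Perm.refl _

lemma insLin_pairwise (l : List Int) (v : Int) (h : l.Pairwise (· ≤ ·)) :
    (insLin l v).Pairwise (· ≤ ·) := by
  induction l with
  | nil => simp [insLin]
  | cons x xs ih =>
    simp only [insLin]
    rcases List.pairwise_cons.mp h with ⟨hx, hxs⟩
    split
    · rename_i hlt
      refine List.pairwise_cons.mpr ⟨?_, ih hxs⟩
      intro y hy
      rcases List.mem_cons.mp ((insLin_perm xs v).mem_iff.mp hy) with rfl | hy'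
      · exact le_of_lt hlt
      · exact hx y hy'
    · rename_i hge
      refine List.pairwise_cons.mpr ⟨?_, h⟩
      intro y hy
      rcases List.mem_cons.mp hy with rfl | hy'
      · omega
      · exact le_trans (by omega) (hx y hy')

-- on a nonempty list permuted to a sorted `f1 :: rest`, the Python min is `f1`
lemma min?_of_perm_sorted (fa : List Int) (f1 : Int) (rest : List Int)
    (hp : fa.Perm (f1 :: rest)) (hs : (f1 :: rest).Pairwise (· ≤ ·)) :
    PySem.List.min? fa (fun x => x) = some f1 := by
  have hne : fa ≠ [] := by
    intro h; subst h; exact (List.cons_ne_nil f1 rest) hp.symm.eq_nil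
  obtain ⟨m, hm⟩ : ∃ m, PySem.List.min? fa (fun x => x) = some m := by
    cases hmm : PySem.List.min? fa (fun x => x) with
    | none => exact absurd ((PySem.List.min?_eq_none_iff _ _).mp hmm) hne
    | some m => exact ⟨m, rfl⟩
  have hmem : m ∈ fa := PySem.List.min?_mem hm
  have hmin : ∀ y ∈ fa, m ≤ y := PySem.List.min?_isMin hm
  have hm1 : m ≤ f1 := hmin f1 (hp.mem_iff.mpr (by simp))
  have h1m : f1 ≤ m := by
    rcases List.mem_cons.mp (hp.mem_iff.mp hmem) with h | h
    · omega
    · exact (List.pairwise_cons.mp hs).1 m h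
  rw [hm, show m = f1 by omega]

-- A's heap loop equals the reference loop on any sorted rearrangement of its heap
lemma go_eq (n : Nat) : ∀ (fa fb : List Int) (K ans : Int), fa.length ≤ n →
    fa.Perm fb → fb.Pairwise (· ≤ ·) → solutionGo fa K ans = sortedGo fb K ans := by
  induction n with
  | zero =>
    intro fa fb K ans hlen hp _
    have hfa : fa = [] := List.length_eq_zero_iff.mp (Nat.le_zero.mp hlen)
    subst hfa
    have hfb : fb = [] := hp.symm.eq_nil
    subst hfb
    rw [solutionGo.eq_def, sortedGo.eq_def]
    rfl
  | succ n ih =>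
    intro fa fb K ans hlen hp hs
    match fb with
    | [] =>
      have hfa : fa = [] := hp.eq_nil
      subst hfa
      rw [solutionGo.eq_def, sortedGo.eq_def]
      rfl
    | f1 :: rest =>
      have hmin : PySem.List.min? fa (fun x => x) = some f1 :=
        min?_of_perm_sorted fa f1 rest hp hs
      have hlena : fa.length = rest.length + 1 := by
        simpa using hp.length_eq
      rw [solutionGo.eq_def]
      split
      · rename_i heq; rw [hmin] at heq; cases heq
      · rename_i m heq
        rw [hmin] at heq
        obtain rfl : f1 = m := Option.some.inj heq
        by_cases hK : f1 < K
        · rw [if_pos hK]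
          match rest with
          | [] =>
            have h1 : fa.length < 2 := by simp at hlena; omega
            rw [if_pos h1, sortedGo.eq_def]
            simp [hK]
          | f2 :: rest' =>
            have h2 : ¬ fa.length < 2 := by simp at hlena; omega
            rw [if_neg h2]
            have hp1 : (fa.erase f1).Perm (f2 :: rest') := by
              simpa [List.erase_cons_head] using hp.erase f1
            have hs1 : (f2 :: rest').Pairwise (· ≤ ·) := (List.pairwise_cons.mp hs).2
            have hmin2 : PySem.List.min? (fa.erase f1) (fun x => x) = some f2 :=
              min?_of_perm_sorted _ f2 rest' hp1 hs1
            split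
            · rename_i heq2; rw [hmin2] at heq2; cases heq2
            · rename_i m2 heq2
              rw [hmin2] at heq2
              obtain rfl : f2 = m2 := Option.some.inj heq2
              rw [sortedGo.eq_def]
              simp only [if_pos hK]
              have hp2 : ((fa.erase f1).erase f2).Perm rest' := by
                simpa [List.erase_cons_head] using hp1.erase f2
              have hstep : (heapPush ((fa.erase f1).erase f2) (f1 + f2 * 2)).Perm
                  ((f1 + f2 * 2) :: (fa.erase f1).erase f2) := by
                simp [heapPush]
              apply ih
              · have hf1 : f1 ∈ fa := PySem.List.min?_mem hmin
                have hf2 : f2 ∈ fa.erase f1 := PySem.List.min?_mem hmin2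
                have e1 : (fa.erase f1).length = fa.length - 1 :=
                  List.length_erase_of_mem hf1
                have e2 : ((fa.erase f1).erase f2).length = (fa.erase f1).length - 1 :=
                  List.length_erase_of_mem hf2
                have p2 : 0 < (fa.erase f1).length := List.length_pos_of_mem hf2
                simp only [heapPush, List.length_append, List.length_cons,
                  List.length_nil, e2, e1]
                omega
              · exact hstep.trans ((hp2.cons _).trans (insLin_perm rest' _).symm)
              · exact insLin_pairwise _ _ (List.pairwise_cons.mp hs1).2
        · rw [if_neg hK, sortedGo.eq_def]
          simp [hK]

-- ===== B-side proof machinery =====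

-- standard merge of two sorted lists, preferring the left list on ties (like popQ)
def mergeL : List Int → List Int → List Int
  | [], t2 => t2
  | t1, [] => t1
  | a :: t1, b :: t2 => if a ≤ b then a :: mergeL t1 (b :: t2) else b :: mergeL (a :: t1) t2
termination_by t1 t2 => t1.length + t2.length

lemma mergeL_nil_right (t : List Int) : mergeL t [] = t := by
  cases t <;> simp [mergeL]

lemma mergeL_perm : ∀ (t1 t2 : List Int), (mergeL t1 t2).Perm (t1 ++ t2) := by
  intro t1 t2
  induction t1, t2 using mergeL.induct with
  | case1 t2 => simp [mergeL]
  | case2 t1 _ => simp [mergeL_nil_right]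
  | case3 a t1 b t2 hab ih => simpa [mergeL, hab] using ih.cons a
  | case4 a t1 b t2 hab ih =>
    simp only [mergeL, if_neg hab]
    exact (ih.cons b).trans (List.perm_middle (l₁ := a :: t1) (l₂ := t2)).symm

lemma mergeL_pairwise : ∀ (t1 t2 : List Int), t1.Pairwise (· ≤ ·) → t2.Pairwise (· ≤ ·) →
    (mergeL t1 t2).Pairwise (· ≤ ·) := by
  intro t1 t2
  induction t1, t2 using mergeL.induct with
  | case1 t2 => intro _ h2; simpa [mergeL]
  | case2 t1 h => intro h1 _; simpa [mergeL_nil_right]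
  | case3 a t1 b t2 hab ih =>
    intro h1 h2
    rcases List.pairwise_cons.mp h1 with ⟨ha, h1'⟩
    simp only [mergeL, if_pos hab]
    refine List.pairwise_cons.mpr ⟨?_, ih h1' h2⟩
    intro y hy
    rcases List.mem_append.mp ((mergeL_perm t1 (b :: t2)).mem_iff.mp hy) with hy1 | hy2
    · exact ha y hy1
    · rcases List.mem_cons.mp hy2 with rfl | hy3
      · exact hab
      · exact le_trans hab ((List.pairwise_cons.mp h2).1 y hy3)
  | case4 a t1 b t2 hab ih =>
    intro h1 h2
    rcases List.pairwise_cons.mp h2 with ⟨hb, h2'⟩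
    simp only [mergeL, if_neg hab]
    refine List.pairwise_cons.mpr ⟨?_, ih h1 h2'⟩
    intro y hy
    rcases List.mem_append.mp ((mergeL_perm (a :: t1) t2).mem_iff.mp hy) with hy1 | hy2
    · rcases List.mem_cons.mp hy1 with rfl | hy3
      · omega
      · exact le_trans (by omega) ((List.pairwise_cons.mp h1).1 y hy3)
    · exact hb y hy2

-- every live mixed value decomposes as a + 2*b with a ≤ b below all originals still
-- live and all mixes created earlier (the creation-time minimality, kept as state)
def Good (S t2 : List Int) : Prop :=
  match t2 with
  | [] => True
  | y :: ys => (∃ a b, y = a + 2 * b ∧ a ≤ b ∧ ∀ x ∈ S, b ≤ x) ∧ Good (S ++ [y]) ys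

lemma good_mono : ∀ (t2 S S' : List Int), Good S t2 → (∀ x ∈ S', x ∈ S) → Good S' t2 := by
  intro t2
  induction t2 with
  | nil => intro S S' _ _; trivial
  | cons y ys ih =>
    intro S S' hg hsub
    obtain ⟨⟨a, b, hy, hab, hb⟩, hrest⟩ := hg
    refine ⟨⟨a, b, hy, hab, fun x hx => hb x (hsub x hx)⟩, ?_⟩
    exact ih (S ++ [y]) (S' ++ [y]) hrest (by
      intro x hx
      rcases List.mem_append.mp hx with h | h
      · exact List.mem_append.mpr (Or.inl (hsub x h))
      · exact List.mem_append.mpr (Or.inr h))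

lemma good_mem : ∀ (v S : List Int), Good S v → ∀ y ∈ v,
    ∃ a b, y = a + 2 * b ∧ a ≤ b ∧ ∀ x ∈ S, b ≤ x := by
  intro v
  induction v with
  | nil => intro S _ y hy; cases hy
  | cons z zs ih =>
    intro S hg y hy
    obtain ⟨⟨a, b, hz, hab, hb⟩, hrest⟩ := hg
    rcases List.mem_cons.mp hy with rfl | hy'
    · exact ⟨a, b, hz, hab, hb⟩
    · obtain ⟨a, b, hy, hab, hb⟩ := ih (S ++ [z]) hrest y hy'
      exact ⟨a, b, hy, hab, fun x hx => hb x (List.mem_append.mpr (Or.inl hx))⟩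

lemma good_drop : ∀ (k : Nat) (S t2 : List Int), Good S t2 → Good (S ++ t2.take k) (t2.drop k) := by
  intro k
  induction k with
  | zero => intro S t2 hg; simpa
  | succ k ih =>
    intro S t2 hg
    cases t2 with
    | nil => simpa
    | cons y ys =>
      obtain ⟨_, hrest⟩ := hg
      simpa [List.append_assoc] using ih (S ++ [y]) ys hrest

lemma good_append : ∀ (t2 S : List Int) (v : Int), Good S t2 →
    (∃ a b, v = a + 2 * b ∧ a ≤ b ∧ ∀ x, (x ∈ S ∨ x ∈ t2) → b ≤ x) →
    Good S (t2 ++ [v]) := by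
  intro t2
  induction t2 with
  | nil =>
    intro S v _ ⟨a, b, hv, hab, hb⟩
    exact ⟨⟨a, b, hv, hab, fun x hx => hb x (Or.inl hx)⟩, trivial⟩
  | cons y ys ih =>
    intro S v hg ⟨a, b, hv, hab, hb⟩
    obtain ⟨hy, hrest⟩ := hg
    refine ⟨hy, ih (S ++ [y]) v hrest ⟨a, b, hv, hab, ?_⟩⟩
    intro x hx
    rcases hx with h | h
    · rcases List.mem_append.mp h with h' | h'
      · exact hb x (Or.inl h')
      · exact hb x (Or.inr (List.mem_cons.mpr (Or.inl (by simpa using h'))))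
    · exact hb x (Or.inr (List.mem_cons.mpr (Or.inr h)))

-- which element popQ takes, as entries of the two queues
lemma popQ_cases (q1 q2 : List Int) (i j : Nat) (v : Int) (i' j' : Nat)
    (h : popQ q1 q2 i j = some (v, i', j')) :
    (∃ _ : i < q1.length, q1[i]? = some v ∧ i' = i + 1 ∧ j' = j) ∨
    (∃ _ : j < q2.length, q2[j]? = some v ∧ i' = i ∧ j' = j + 1) := by
  unfold popQ at h
  cases h1 : q1[i]? with
  | none =>
    cases h2 : q2[j]? with
    | none => rw [h1, h2] at h; exact absurd h (by simp)
    | some b =>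
      rw [h1, h2] at h
      simp only [Option.some.injEq, Prod.mk.injEq] at h
      obtain ⟨rfl, rfl, rfl⟩ := h
      obtain ⟨hlt, -⟩ := List.getElem?_eq_some_iff.mp h2
      exact Or.inr ⟨hlt, rfl, rfl, rfl⟩
  | some a =>
    obtain ⟨hia, -⟩ := List.getElem?_eq_some_iff.mp h1
    cases h2 : q2[j]? with
    | none =>
      rw [h1, h2] at h
      simp only [Option.some.injEq, Prod.mk.injEq] at h
      obtain ⟨rfl, rfl, rfl⟩ := h
      exact Or.inl ⟨hia, rfl, rfl, rfl⟩
    | some b =>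
      obtain ⟨hjb, -⟩ := List.getElem?_eq_some_iff.mp h2
      rw [h1, h2] at h
      dsimp only at h
      split_ifs at h with hab <;>
        (simp only [Option.some.injEq, Prod.mk.injEq] at h; obtain ⟨rfl, rfl, rfl⟩ := h)
      · exact Or.inl ⟨hia, rfl, rfl, rfl⟩
      · exact Or.inr ⟨hjb, rfl, rfl, rfl⟩

lemma popQ_none_iff (q1 q2 : List Int) (i j : Nat) :
    popQ q1 q2 i j = none ↔ (q1.length ≤ i ∧ q2.length ≤ j) := by
  unfold popQ
  cases h1 : q1[i]? with
  | none =>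
    have hi := List.getElem?_eq_none_iff.mp h1
    cases h2 : q2[j]? with
    | none =>
      have hj := List.getElem?_eq_none_iff.mp h2
      simpa using ⟨hi, hj⟩
    | some b =>
      obtain ⟨hj, -⟩ := List.getElem?_eq_some_iff.mp h2
      simp only []
      constructor
      · intro h; cases h
      · intro ⟨_, hj'⟩; omega
  | some a =>
    obtain ⟨hi, -⟩ := List.getElem?_eq_some_iff.mp h1
    cases h2 : q2[j]? with
    | none =>
      constructor
      · intro h; cases h
      · intro ⟨hi', _⟩; omega
    | some b =>
      constructor
      · intro h; by_cases hab : a ≤ b <;> simp [hab] at h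
      · intro ⟨hi', _⟩; omega

-- popQ takes exactly the head of the merged live lists
lemma popQ_merge (q1 q2 : List Int) (i j : Nat) (v : Int) (i' j' : Nat)
    (h : popQ q1 q2 i j = some (v, i', j')) :
    mergeL (q1.drop i) (q2.drop j) = v :: mergeL (q1.drop i') (q2.drop j') := by
  unfold popQ at h
  cases h1 : q1[i]? with
  | none =>
    have hd1 : q1.drop i = [] := List.drop_eq_nil_iff.mpr (List.getElem?_eq_none_iff.mp h1)
    cases h2 : q2[j]? with
    | none => rw [h1, h2] at h; exact absurd h (by simp)
    | some b =>
      rw [h1, h2] at h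
      simp only [Option.some.injEq, Prod.mk.injEq] at h
      obtain ⟨rfl, rfl, rfl⟩ := h
      obtain ⟨hj, hjv⟩ := List.getElem?_eq_some_iff.mp h2
      have hd2 : q2.drop j = b :: q2.drop (j + 1) := by
        rw [List.drop_eq_getElem_cons hj, hjv]
      rw [hd1, hd2]
      simp [mergeL]
  | some a =>
    obtain ⟨hi, hiv⟩ := List.getElem?_eq_some_iff.mp h1
    have hd1 : q1.drop i = a :: q1.drop (i + 1) := by
      rw [List.drop_eq_getElem_cons hi, hiv]
    cases h2 : q2[j]? with
    | none =>
      have hd2 : q2.drop j = [] := List.drop_eq_nil_iff.mpr (List.getElem?_eq_none_iff.mp h2)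
      rw [h1, h2] at h
      simp only [Option.some.injEq, Prod.mk.injEq] at h
      obtain ⟨rfl, rfl, rfl⟩ := h
      rw [hd1, hd2, mergeL_nil_right, mergeL_nil_right]
    | some b =>
      obtain ⟨hj, hjv⟩ := List.getElem?_eq_some_iff.mp h2
      have hd2 : q2.drop j = b :: q2.drop (j + 1) := by
        rw [List.drop_eq_getElem_cons hj, hjv]
      rw [h1, h2] at h
      dsimp only at h
      split_ifs at h with hab <;>
        (simp only [Option.some.injEq, Prod.mk.injEq] at h; obtain ⟨rfl, rfl, rfl⟩ := h)
      · rw [hd1, hd2]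
        simp [mergeL, hab]
      · rw [hd1, hd2]
        simp [mergeL, hab]

-- B's two-queue loop equals the reference loop on the merge of the two live queues
lemma alt_eq (n : Nat) : ∀ (q1 q2 : List Int) (i j : Nat) (K ans : Int),
    (q1.length - i) + (q2.length - j) ≤ n →
    i ≤ q1.length → j ≤ q2.length →
    q1.Pairwise (· ≤ ·) → (q2.drop j).Pairwise (· ≤ ·) →
    Good (q1.drop i) (q2.drop j) →
    altGo q1 q2 i j K ans = sortedGo (mergeL (q1.drop i) (q2.drop j)) K ans := by
  induction n with
  | zero =>
    intro q1 q2 i j K ans hn hi hj _ _ _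
    have hnone : popQ q1 q2 i j = none :=
      (popQ_none_iff q1 q2 i j).mpr ⟨by omega, by omega⟩
    have hd1 : q1.drop i = [] := List.drop_eq_nil_iff.mpr (by omega)
    have hd2 : q2.drop j = [] := List.drop_eq_nil_iff.mpr (by omega)
    rw [altGo.eq_def, hnone, hd1, hd2, mergeL_nil_right, sortedGo.eq_def]
  | succ n ih =>
    intro q1 q2 i j K ans hn hi hj hs1 hs2 hg
    rw [altGo.eq_def]
    split
    · rename_i h1
      obtain ⟨hi', hj'⟩ := (popQ_none_iff q1 q2 i j).mp h1
      rw [List.drop_eq_nil_iff.mpr hi', List.drop_eq_nil_iff.mpr hj',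
        mergeL_nil_right, sortedGo.eq_def]
    · rename_i f1 i1 j1 h1
      have hm1 : mergeL (q1.drop i) (q2.drop j) = f1 :: mergeL (q1.drop i1) (q2.drop j1) :=
        popQ_merge q1 q2 i j f1 i1 j1 h1
      have hsh1 := popQ_shape q1 q2 i j f1 i1 j1 h1
      have hfe1 : i1 + j1 = i + j + 1 ∧ i ≤ i1 ∧ j ≤ j1 ∧ i1 ≤ q1.length ∧ j1 ≤ q2.length := by
        rcases hsh1 with ⟨h, rfl, rfl⟩ | ⟨h, rfl, rfl⟩ <;> omega
      obtain ⟨e1, d1, g1, b1, c1⟩ := hfe1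
      by_cases hK : f1 < K
      · rw [if_pos hK]
        have hlenM : (mergeL (q1.drop i) (q2.drop j)).length
            = (q1.length - i) + (q2.length - j) := by
          rw [(mergeL_perm _ _).length_eq]
          simp [List.length_append]
        by_cases hlive : ((q1.length : Int) - i) + ((q2.length : Int) - j) < 2
        · rw [if_pos hlive]
          have hone : (mergeL (q1.drop i) (q2.drop j)).length = 1 := by
            rw [hm1]
            rw [hm1] at hlenM
            simp only [List.length_cons] at hlenM ⊢
            omega
          have hnil : mergeL (q1.drop i1) (q2.drop j1) = [] := by
            rw [hm1] at hone
            simpa using hone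
          rw [hm1, hnil, sortedGo.eq_def]
          simp [hK]
        · rw [if_neg hlive]
          split
          · rename_i h2
            exfalso
            obtain ⟨hi1', hj1'⟩ := (popQ_none_iff q1 q2 i1 j1).mp h2
            have hz : mergeL (q1.drop i1) (q2.drop j1) = [] := by
              rw [List.drop_eq_nil_iff.mpr hi1', List.drop_eq_nil_iff.mpr hj1',
                mergeL_nil_right]
            rw [hm1, hz] at hlenM
            simp only [List.length_cons, List.length_nil] at hlenM
            omega
          · rename_i f2 i2 j2 h2
            have hsh2 := popQ_shape q1 q2 i1 j1 f2 i2 j2 h2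
            have hfe2 : i2 + j2 = i + j + 2 ∧ i1 ≤ i2 ∧ j1 ≤ j2 ∧ i2 ≤ q1.length ∧
                j2 ≤ q2.length ∧
                (q1.length - i2) + (q2.length + 1 - j2) + 1
                  ≤ (q1.length - i) + (q2.length - j) := by
              rcases hsh1 with ⟨h, he1, he2⟩ | ⟨h, he1, he2⟩ <;>
                rcases hsh2 with ⟨h', rfl, rfl⟩ | ⟨h', rfl, rfl⟩ <;> omega
            obtain ⟨e2, d2, g2, b2, c2, hdec⟩ := hfe2
            have hm2 : mergeL (q1.drop i1) (q2.drop j1)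
                = f2 :: mergeL (q1.drop i2) (q2.drop j2) :=
              popQ_merge q1 q2 i1 j1 f2 i2 j2 h2
            -- sortedness of the current merge
            have hsM : (mergeL (q1.drop i) (q2.drop j)).Pairwise (· ≤ ·) :=
              mergeL_pairwise _ _ (hs1.sublist (List.drop_sublist i q1)) hs2
            rw [hm1, hm2] at hsM
            have hf12 : f1 ≤ f2 := (List.pairwise_cons.mp hsM).1 f2 (by simp)
            have hf2M : ∀ y ∈ mergeL (q1.drop i2) (q2.drop j2), f2 ≤ y := by
              intro y hy
              exact (List.pairwise_cons.mp (List.pairwise_cons.mp hsM).2).1 y hy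
            have hsM2 : (mergeL (q1.drop i2) (q2.drop j2)).Pairwise (· ≤ ·) :=
              (List.pairwise_cons.mp (List.pairwise_cons.mp hsM).2).2
            set new := f1 + f2 * 2 with hnew
            -- every survivor of q2 is at most `new`
            have hbound : ∀ y ∈ q2.drop j2, y ≤ new := by
              intro y hy
              have hysplit : y ∈ (q2.drop j).drop (j2 - j) := by
                rwa [List.drop_drop, Nat.add_sub_cancel' (by omega)]
              have hgood2 : Good (q1.drop i ++ (q2.drop j).take (j2 - j))
                  ((q2.drop j).drop (j2 - j)) :=
                good_drop (j2 - j) (q1.drop i) (q2.drop j) hg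
              obtain ⟨a, b, hy', hab, hb0⟩ := good_mem _ _ hgood2 y hysplit
              have hb : ∀ x, (x ∈ q1.drop i ∨ x ∈ (q2.drop j).take (j2 - j)) → b ≤ x :=
                fun x hx => hb0 x (List.mem_append.mpr hx)
              -- each popped value bounds b from above
              have hbf1 : b ≤ f1 := by
                rcases popQ_cases q1 q2 i j f1 i1 j1 h1 with
                  ⟨hlt, hget, hie, hje⟩ | ⟨hlt, hget, hie, hje⟩
                · refine hb f1 (Or.inl ?_)
                  have : q1.drop i = f1 :: q1.drop (i + 1) := by
                    rw [List.drop_eq_getElem_cons hlt,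
                      (List.getElem?_eq_some_iff.mp hget).2]
                  rw [this]; simp
                · refine hb f1 (Or.inr ?_)
                  have hdj : q2.drop j = f1 :: q2.drop (j + 1) := by
                    rw [List.drop_eq_getElem_cons hlt,
                      (List.getElem?_eq_some_iff.mp hget).2]
                  have hk1 : 1 ≤ j2 - j := by omega
                  rcases Nat.exists_eq_add_of_le hk1 with ⟨k, hk⟩
                  have hk' : j2 - j = k + 1 := by omega
                  rw [hdj, hk']
                  simp
              have hbf2 : b ≤ f2 := by
                rcases popQ_cases q1 q2 i1 j1 f2 i2 j2 h2 with
                  ⟨hlt, hget, hie, hje⟩ | ⟨hlt, hget, hie, hje⟩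
                · refine hb f2 (Or.inl ?_)
                  have hmem : f2 ∈ q1.drop i1 := by
                    rw [List.drop_eq_getElem_cons hlt,
                      (List.getElem?_eq_some_iff.mp hget).2]
                    simp
                  have hq : q1.drop i1 = (q1.drop i).drop (i1 - i) := by
                    rw [List.drop_drop, Nat.add_sub_cancel' d1]
                  rw [hq] at hmem
                  exact List.mem_of_mem_drop hmem
                · refine hb f2 (Or.inr ?_)
                  have hdj : q2.drop j1 = f2 :: q2.drop (j1 + 1) := by
                    rw [List.drop_eq_getElem_cons hlt,
                      (List.getElem?_eq_some_iff.mp hget).2]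
                  have hdjj : q2.drop j1 = (q2.drop j).drop (j1 - j) := by
                    rw [List.drop_drop, Nat.add_sub_cancel' g1]
                  have hgetp : (q2.drop j)[j1 - j]? = some f2 := by
                    have hh : ((q2.drop j).drop (j1 - j)).head? = some f2 := by
                      rw [← hdjj, hdj]; rfl
                    rwa [List.head?_drop] at hh
                  have hlt2 : j1 - j < j2 - j := by omega
                  have hfin : ((q2.drop j).take (j2 - j))[j1 - j]? = some f2 := by
                    rw [List.getElem?_take_of_lt hlt2]
                    exact hgetp
                  exact List.mem_of_getElem? hfin
              omega
            -- the new live tail of q2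
            have hq2app : (q2 ++ [new]).drop j2 = q2.drop j2 ++ [new] :=
              List.drop_append_of_le_length (by omega)
            -- its sortedness
            have hs2' : ((q2 ++ [new]).drop j2).Pairwise (· ≤ ·) := by
              rw [hq2app]
              refine List.pairwise_append.mpr ⟨?_, by simp, ?_⟩
              · refine hs2.sublist ?_
                have hq : q2.drop j2 = (q2.drop j).drop (j2 - j) := by
                  rw [List.drop_drop, Nat.add_sub_cancel' (by omega)]
                rw [hq]
                exact List.drop_sublist _ _
              · intro a ha b hbm
                rw [List.mem_singleton] at hbm
                subst hbm
                exact hbound a ha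
            -- Good for the new state
            have hg' : Good (q1.drop i2) ((q2 ++ [new]).drop j2) := by
              rw [hq2app]
              refine good_append _ _ _ ?_ ?_
              · have hgd := good_drop (j2 - j) (q1.drop i) (q2.drop j) hg
                rw [List.drop_drop, Nat.add_sub_cancel' (by omega)] at hgd
                refine good_mono _ _ _ hgd ?_
                intro x hx
                refine List.mem_append.mpr (Or.inl ?_)
                have hq : q1.drop i2 = (q1.drop i).drop (i2 - i) := by
                  rw [List.drop_drop, Nat.add_sub_cancel' (by omega)]
                rw [hq] at hx
                exact List.mem_of_mem_drop hx
              · refine ⟨f1, f2, by omega, hf12, ?_⟩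
                intro x hx
                refine hf2M x ?_
                exact (mergeL_perm _ _).mem_iff.mpr (List.mem_append.mpr hx)
            -- apply the induction hypothesis
            have hrec := ih q1 (q2 ++ [new]) i2 j2 K (ans + 1)
              (by
                simp only [List.length_append, List.length_cons, List.length_nil]
                omega)
              (by omega)
              (by simp only [List.length_append, List.length_cons, List.length_nil]; omega)
              hs1 hs2' hg'
            rw [hrec]
            -- identify the new merge with insLin of the old tail
            have hperm : (mergeL (q1.drop i2) ((q2 ++ [new]).drop j2)).Perm
                (insLin (mergeL (q1.drop i2) (q2.drop j2)) new) := by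
              rw [hq2app]
              refine (mergeL_perm _ _).trans ?_
              have h3 : (q1.drop i2 ++ (q2.drop j2 ++ [new])).Perm
                  (new :: (q1.drop i2 ++ q2.drop j2)) := by
                have := List.perm_middle (a := new)
                  (l₁ := q1.drop i2 ++ q2.drop j2) (l₂ := ([] : List Int))
                simpa using this
              exact h3.trans (((mergeL_perm _ _).symm.cons new).trans (insLin_perm _ _).symm)
            have hsort1 : (mergeL (q1.drop i2) ((q2 ++ [new]).drop j2)).Pairwise (· ≤ ·) :=
              mergeL_pairwise _ _ (hs1.sublist (List.drop_sublist i2 q1)) hs2'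
            have hsort2 : (insLin (mergeL (q1.drop i2) (q2.drop j2)) new).Pairwise (· ≤ ·) :=
              insLin_pairwise _ _ hsM2
            have heqm : mergeL (q1.drop i2) ((q2 ++ [new]).drop j2)
                = insLin (mergeL (q1.drop i2) (q2.drop j2)) new := by
              rw [hq2app] at hsort1 ⊢
              rw [hq2app] at hperm
              exact List.Perm.eq_of_pairwise' hsort1 hsort2 hperm
            rw [heqm, hm1, hm2]
            conv_rhs => rw [sortedGo.eq_def]
            simp [hK, hnew]
      · rw [if_neg hK, hm1, sortedGo.eq_def]
        simp [hK]

-- ===== VERDICT (by name: the statement is the Claim_ definition above) =====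
theorem solution_spec : Claim_equal_solution := by
  intro scoville K _ _
  unfold Spec_solution solution solution_alt
  have hfold : scoville.foldl heapPush [] = scoville := by
    rw [show heapPush = (fun (acc : List Int) (x : Int) => acc ++ [x]) from rfl,
      PySem.List.foldl_append_singleton, List.nil_append]
  have hsorted := PySem.List.sorted_pairwise scoville (fun x => x)
  have halt := alt_eq ((PySem.List.sorted scoville (fun x => x) false).length + 1)
    (PySem.List.sorted scoville (fun x => x) false) [] 0 0 K 0
    (by simp) (by omega) (by simp) (by simpa using hsorted) (by simp) (by simp [Good])
  rw [hfold, halt]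
  simp only [List.drop_zero, List.drop_nil, mergeL_nil_right]
  exact go_eq scoville.length scoville _ K 0 le_rfl
    (PySem.List.sorted_perm scoville (fun x => x) false).symm
    hsorted
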